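-- pv_equiv track=rewrite | github.com/rB080/ribsup | scope_tools/logger.py | log_consistency
-- ===== SOURCE A (Python) =====
-- def log_consistency(log):
--     sizes = []
--     for k in log.keys():
--         sizes.append(len(log[k]))
--     if len(set(sizes)) == 1:
--         return True
--     else:
--         return False
-- ===== SOURCE B (Python) =====
-- def log_consistency(log):
--     it = iter(log.values())
--     try:
--         n = len(next(it))
--     except StopIteration:
--         return False
--     return all(len(v) == n for v in it)
-- ===== Notes on version B (the rewrite author's own statement) =====
-- stated objective: simpler
-- what changed: B drops the sizes list and the set entirely: it takes the first value's length and short-circuits with all(len(v) == n), returning False for an empty dict explicitly instead of via set-cardinality.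
import Mathlib
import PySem

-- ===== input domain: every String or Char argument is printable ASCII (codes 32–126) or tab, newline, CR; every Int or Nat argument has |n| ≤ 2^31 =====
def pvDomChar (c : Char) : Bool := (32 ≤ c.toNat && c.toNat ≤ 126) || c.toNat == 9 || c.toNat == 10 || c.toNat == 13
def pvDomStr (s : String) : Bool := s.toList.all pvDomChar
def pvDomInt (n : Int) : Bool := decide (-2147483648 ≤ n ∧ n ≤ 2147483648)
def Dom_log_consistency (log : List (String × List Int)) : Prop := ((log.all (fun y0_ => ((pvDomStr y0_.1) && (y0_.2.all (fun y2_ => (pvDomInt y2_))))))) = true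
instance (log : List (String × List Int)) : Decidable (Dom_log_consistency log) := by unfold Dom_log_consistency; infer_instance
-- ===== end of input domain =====

-- B replaces the sizes-list + set-cardinality test with a short-circuit compare-to-first over the values (simpler; empty dict handled explicitly).
-- ===== PORT A =====
def log_consistency (log : List (String × List Int)) : Bool :=
  let d := PySem.Dict.ofList log
  let sizes := d.keys.foldl (fun sizes k => sizes ++ [((d.getD k []).length : Int)]) ([] : List Int)
  if (PySem.Set.ofList sizes).length == 1 then true else false

-- ===== PORT B =====
def log_consistency_alt (log : List (String × List Int)) : Bool :=
  match (PySem.Dict.ofList log).values with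
  | [] => false
  | v :: rest => rest.all (fun w => w.length == v.length)

-- ===== PRECONDITION & SPEC =====
def Spec_log_consistency (log : List (String × List Int)) (out : Bool) : Prop := out = log_consistency_alt log
instance (log : List (String × List Int)) (out : Bool) : Decidable (Spec_log_consistency log out) := by unfold Spec_log_consistency; infer_instance

-- ===== CLAIM (what is proved, stated in full; the proofs are below) =====
def Claim_equal_log_consistency : Prop := ∀ (log : List (String × List Int)), Dom_log_consistency log → Spec_log_consistency log (log_consistency log)

-- ===== LEMMAS AND PROOFS =====
theorem foldl_snoc {α β : Type} (f : α → β) (l : List α) (acc : List β) :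
    l.foldl (fun a k => a ++ [f k]) acc = acc ++ l.map f := by
  induction l generalizing acc with
  | nil => simp
  | cons h t ih => simp [List.foldl_cons, ih]

theorem set_len_one (x : Int) (xs : List Int) :
    ((PySem.Set.ofList (x :: xs)).length == 1) = xs.all (fun y => y == x) := by
  have hd : (PySem.Set.ofList xs).discard x
      = (PySem.Set.ofList xs).filter (fun y => !(y == x)) := by
    simp [PySem.Set.discard]
  rw [PySem.Set.ofList_cons, hd, Bool.eq_iff_iff]
  simp only [List.length_cons, beq_iff_eq, List.all_eq_true, beq_iff_eq]
  constructor
  · intro h y hy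
    have hlen : (List.filter (fun y => !(y == x)) (PySem.Set.ofList xs)).length = 0 := by omega
    have hnil := List.length_eq_zero_iff.mp hlen
    rw [List.filter_eq_nil_iff] at hnil
    have := hnil y ((PySem.Set.mem_ofList xs y).mpr hy)
    simpa using this
  · intro h
    have hnil : List.filter (fun y => !(y == x)) (PySem.Set.ofList xs) = [] := by
      rw [List.filter_eq_nil_iff]
      intro a ha
      simpa using h a ((PySem.Set.mem_ofList xs a).mp ha)
    rw [hnil]
    rfl



theorem all_len (v : List Int) (rest : List (List Int)) :
    (List.map (fun w => ((w.length : Int))) rest).all (fun y => y == (v.length : Int))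
      = rest.all (fun w => w.length == v.length) := by
  rw [Bool.eq_iff_iff]
  simp [List.all_eq_true]

theorem main (log : List (String × List Int)) :
    log_consistency log = log_consistency_alt log := by
  unfold log_consistency log_consistency_alt
  dsimp only
  set d := PySem.Dict.ofList log with hdd
  have hnd : d.keys.Nodup := PySem.Dict.nodup_keys_ofList log
  have hv : d.values = d.keys.map (fun k => d.getD k []) :=
    PySem.Dict.values_eq_map_keys d hnd []
  rw [foldl_snoc (fun k => ((d.getD k []).length : Int)) d.keys []]
  simp only [List.nil_append]
  have hsz : d.keys.map (fun k => ((d.getD k []).length : Int))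
      = d.values.map (fun v => (v.length : Int)) := by
    rw [hv, List.map_map]; rfl
  rw [hsz]
  cases hval : d.values with
  | nil => rfl
  | cons v rest =>
    simp only [List.map_cons]
    split <;> rename_i h <;> rw [set_len_one, all_len] at h
    · exact h.symm
    · exact ((Bool.not_eq_true _).mp h).symm



-- ===== VERDICT (by name: the statement is the Claim_ definition above) =====
theorem log_consistency_spec : Claim_equal_log_consistency := by
  intro log _
  unfold Spec_log_consistency
  exact main log
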